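-- pv_equiv track=rewrite | github.com/jeffreyhorn/nlp2mcp | src/ir/preprocessor.py | _is_include_directive
-- ===== SOURCE A (Python) =====
-- def _is_include_directive(line: str) -> bool:
--     """Check if a line contains an actual $include/$batInclude directive.
--
--     Returns True only if the directive appears as actual code, not inside
--     quoted strings or comments. Handles:
--     - Standalone directives: `$include "file.gms"`
--     - Inline after conditionals: `$if set X $include "file.gms"`
--
--     Args:
--         line: A single line of GAMS source code
--
--     Returns:
--         True if the line contains an actual include directive to strip
--     """
--     # Check if line is already a comment
--     stripped = line.lstrip()
--     if stripped.startswith("*"):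
--         return False
--
--     # Scan through the line, tracking whether we're inside quotes
--     in_single_quote = False
--     in_double_quote = False
--     i = 0
--     line_lower = line.lower()
--     length = len(line)
--
--     while i < length:
--         char = line[i]
--
--         # Handle quote state changes with escaped quote handling ('' and "")
--         if char == "'" and not in_double_quote:
--             # Check for escaped single quote ('') inside single-quoted string
--             if in_single_quote and i + 1 < length and line[i + 1] == "'":
--                 # Skip both quotes - this is an escaped literal quote
--                 i += 2
--                 continue
--             in_single_quote = not in_single_quote
--         elif char == '"' and not in_single_quote:
--             # Check for escaped double quote ("") inside double-quoted string
--             if in_double_quote and i + 1 < length and line[i + 1] == '"':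
--                 # Skip both quotes - this is an escaped literal quote
--                 i += 2
--                 continue
--             in_double_quote = not in_double_quote
--         elif not in_single_quote and not in_double_quote:
--             # Only treat '*' as starting an inline comment in valid comment
--             # positions: first non-whitespace character, or after a statement
--             # terminator ';'. In other positions (e.g., 'a*b'), it's a
--             # multiplication operator and we must continue scanning.
--             if char == "*":
--                 # Look backwards for the previous non-whitespace character
--                 j = i - 1
--                 while j >= 0 and line[j].isspace():
--                     j -= 1
--                 # Comment start if: first token (j < 0) or after ';'
--                 if j < 0 or line[j] == ";":
--                     break
--             # Check for $ directive when not inside quotes or comments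
--             if char == "$":
--                 # Check if this is $include or $batinclude
--                 remaining = line_lower[i:]
--                 if remaining.startswith("$include") or remaining.startswith("$batinclude"):
--                     # Verify it's a word boundary (not $includefoo or $include_foo)
--                     directive_len = 8 if remaining.startswith("$include") else 11
--                     if len(remaining) == directive_len:
--                         return True
--                     next_char = remaining[directive_len]
--                     # Treat '_' as an identifier character to avoid misdetecting $include_foo
--                     if not (next_char.isalnum() or next_char == "_"):
--                         return True
--         i += 1
--
--     return False
-- ===== SOURCE B (Python) =====
-- def _is_include_directive(line: str) -> bool:
--     """Check if a line contains an actual $include/$batInclude directive.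
--
--     Same behaviour as the original, but the backward whitespace rescan at
--     each '*' (and the separate lstrip() comment pre-check) are replaced by a
--     single maintained 'last non-whitespace character seen' state.
--     """
--     in_single_quote = False
--     in_double_quote = False
--     last = None  # last non-whitespace character scanned so far
--     i = 0
--     n = len(line)
--     while i < n:
--         c = line[i]
--         if c == "'" and not in_double_quote:
--             if in_single_quote and i + 1 < n and line[i + 1] == "'":
--                 last = "'"
--                 i += 2
--                 continue
--             in_single_quote = not in_single_quote
--         elif c == '"' and not in_single_quote:
--             if in_double_quote and i + 1 < n and line[i + 1] == '"':
--                 last = '"'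
--                 i += 2
--                 continue
--             in_double_quote = not in_double_quote
--         elif not in_single_quote and not in_double_quote:
--             if c == "*" and (last is None or last == ";"):
--                 return False
--             if c == "$" and _directive_here(line[i:].lower()):
--                 return True
--         if not c.isspace():
--             last = c
--         i += 1
--     return False
--
--
-- def _directive_here(rem: str) -> bool:
--     """rem starts at a '$' (lowercased): is it a word-bounded include directive?"""
--     for word in ("$include", "$batinclude"):
--         if rem.startswith(word):
--             tail = rem[len(word):]
--             return tail == "" or not (tail[0].isalnum() or tail[0] == "_")
--     return False
-- ===== Notes on version B (the rewrite author's own statement) =====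
-- stated objective: simpler
-- what changed: The inner backward whitespace rescan at each '*' and the separate lstrip() comment pre-check are removed; a single left-to-right scan maintains the last non-whitespace character seen, and '*' starts a comment iff that state is None or ';'.
import Mathlib
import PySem

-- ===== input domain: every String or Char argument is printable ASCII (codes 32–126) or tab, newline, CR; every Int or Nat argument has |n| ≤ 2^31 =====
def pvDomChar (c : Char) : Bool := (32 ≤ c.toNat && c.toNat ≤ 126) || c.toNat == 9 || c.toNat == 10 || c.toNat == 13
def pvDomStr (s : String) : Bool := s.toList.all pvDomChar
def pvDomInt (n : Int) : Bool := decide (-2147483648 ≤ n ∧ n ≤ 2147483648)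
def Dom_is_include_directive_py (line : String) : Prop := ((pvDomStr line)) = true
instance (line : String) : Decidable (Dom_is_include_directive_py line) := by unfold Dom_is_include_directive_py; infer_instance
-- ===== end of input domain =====

-- B replaces A's backward whitespace rescan at each '*' (and the lstrip() comment
-- pre-check) by a maintained last-non-whitespace-character state: simpler, one pass.

-- ===== PORT A =====
-- inner `while j >= 0 and line[j].isspace(): j -= 1`
def pvABack (cs : List Char) (j : Int) : Int :=
  if 0 ≤ j ∧ ((match PySem.List.pyGet? cs j with
              | some c => PySem.Chars.isspace c
              | none => false) = true) then
    pvABack cs (j - 1)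
  else j
termination_by (j + 1).toNat
decreasing_by omega

-- the `$` directive test on remaining = line_lower[i:]
def pvADir (remaining : List Char) : Bool :=
  if PySem.Chars.startswith remaining ("$include".toList)
      || PySem.Chars.startswith remaining ("$batinclude".toList) then
    let dlen : Nat := if PySem.Chars.startswith remaining ("$include".toList) then 8 else 11
    if remaining.length = dlen then true
    else
      match PySem.List.pyGet? remaining (dlen : Int) with
      | some nc => !(PySem.Chars.isalnum nc || nc == '_')
      | none => false
  else false

-- the main `while i < length` loop
def pvALoop (cs csLow : List Char) (inS inD : Bool) (i : Nat) : Bool :=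
  if hlt : i < cs.length then
    let c := cs[i]
    if c == '\'' && !inD then
      if inS && decide (i + 1 < cs.length) && (cs[i+1]? == some '\'') then
        pvALoop cs csLow inS inD (i + 2)
      else pvALoop cs csLow (!inS) inD (i + 1)
    else if c == '"' && !inS then
      if inD && decide (i + 1 < cs.length) && (cs[i+1]? == some '"') then
        pvALoop cs csLow inS inD (i + 2)
      else pvALoop cs csLow inS (!inD) (i + 1)
    else if !inS && !inD then
      if c == '*' && (let j := pvABack cs ((i : Int) - 1);
                      decide (j < 0) || (PySem.List.pyGet? cs j == some ';')) then
        false  -- break, then `return False`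
      else if c == '$' && pvADir (csLow.drop i) then true
      else pvALoop cs csLow inS inD (i + 1)
    else pvALoop cs csLow inS inD (i + 1)
  else false
termination_by cs.length - i

def is_include_directive_py (line : String) : Bool :=
  let cs := line.toList
  if PySem.Chars.startswith (PySem.Chars.lstrip cs) ['*'] then false
  else pvALoop cs (PySem.Chars.lower cs) false false 0

-- ===== PORT B =====
-- word-boundary check on the tail after the directive word
def pvBBound (tail : List Char) : Bool :=
  match tail with
  | [] => true
  | nc :: _ => !(PySem.Chars.isalnum nc || nc == '_')

-- _directive_here: first matching word of the two decides
def pvBDir (rem : List Char) : Bool :=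
  (["$include".toList, "$batinclude".toList].findSome? (fun w =>
      if PySem.Chars.startswith rem w then some (pvBBound (rem.drop w.length)) else none)).getD false

-- the single scan, carrying the last non-whitespace character seen
def pvBLoop (l : List Char) (inS inD : Bool) (last : Option Char) : Bool :=
  match l with
  | [] => false
  | c :: rest =>
    let last' := if PySem.Chars.isspace c then last else some c
    if c == '\'' && !inD then
      if inS && (rest.head? == some '\'') then pvBLoop rest.tail inS inD (some '\'')
      else pvBLoop rest (!inS) inD last'
    else if c == '"' && !inS then
      if inD && (rest.head? == some '"') then pvBLoop rest.tail inS inD (some '"')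
      else pvBLoop rest inS (!inD) last'
    else if !inS && !inD then
      if c == '*' && (last == none || last == some ';') then false
      else if c == '$' && pvBDir (PySem.Chars.lower (c :: rest)) then true
      else pvBLoop rest inS inD last'
    else pvBLoop rest inS inD last'
termination_by l.length
decreasing_by all_goals (simp [List.length_tail]; try omega)

def is_include_directive_py_alt (line : String) : Bool :=
  pvBLoop line.toList false false none

-- ===== PRECONDITION & SPEC =====
def Spec_is_include_directive_py (line : String) (out : Bool) : Prop := out = is_include_directive_py_alt line
instance (line : String) (out : Bool) : Decidable (Spec_is_include_directive_py line out) := by unfold Spec_is_include_directive_py; infer_instance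

-- ===== CLAIM (what is proved, stated in full; the proofs are below) =====
def Claim_equal_is_include_directive_py : Prop := ∀ (line : String), Dom_is_include_directive_py line → Spec_is_include_directive_py line (is_include_directive_py line)

-- ===== LEMMAS AND PROOFS =====

-- last non-whitespace character of a prefix
def pvLastNW (l : List Char) : Option Char :=
  l.foldl (fun acc c => if PySem.Chars.isspace c then acc else some c) none

theorem pvLastNW_append_one (l : List Char) (c : Char) :
    pvLastNW (l ++ [c]) = if PySem.Chars.isspace c then pvLastNW l else some c := by
  simp [pvLastNW, List.foldl_append]

theorem pvBack_eq (cs : List Char) : ∀ i : Nat, i ≤ cs.length →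
    (let j := pvABack cs ((i : Int) - 1);
     (decide (j < 0) || (PySem.List.pyGet? cs j == some ';')))
    = ((pvLastNW (cs.take i) == none) || (pvLastNW (cs.take i) == some ';')) := by
  intro i
  induction i with
  | zero =>
    intro _
    have hstop : pvABack cs (-1) = -1 := by
      rw [pvABack]; simp
    simp [pvLastNW, hstop]
  | succ i ih =>
    intro h
    have hi : i < cs.length := by omega
    have hcast : ((i + 1 : Nat) : Int) - 1 = (i : Int) := by push_cast; ring
    have hget : PySem.List.pyGet? cs (i : Int) = some cs[i] := by
      simp [PySem.List.pyGet?_natCast, List.getElem?_eq_getElem hi]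
    have htake : cs.take (i + 1) = cs.take i ++ [cs[i]] := by
      rw [List.take_add_one]; simp [List.getElem?_eq_getElem hi]
    by_cases hs : PySem.Chars.isspace cs[i] = true
    · have hstep : pvABack cs (((i + 1 : Nat) : Int) - 1) = pvABack cs ((i : Int) - 1) := by
        rw [hcast, pvABack]; simp [hget, hs]
      simp only [hstep, htake, pvLastNW_append_one, hs, if_pos]
      exact ih (by omega)
    · have hstep : pvABack cs (((i + 1 : Nat) : Int) - 1) = (i : Int) := by
        rw [hcast, pvABack]; simp [hget, hs]
      simp only [hstep, htake, pvLastNW_append_one, if_neg hs]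
      simp [hget]

theorem pvDir_bound (rem : List Char) (d : Nat) (hd : d ≤ rem.length) :
    (decide (rem.length = d) ||
     match PySem.List.pyGet? rem (d : Int) with
     | some nc => !PySem.Chars.isalnum nc && !nc == '_'
     | none => false) = pvBBound (rem.drop d) := by
  by_cases h : rem.length = d
  · simp [h, List.drop_of_length_le, pvBBound]
  · have hlt : d < rem.length := by omega
    rw [List.drop_eq_getElem_cons hlt]
    simp [h, pvBBound, PySem.List.pyGet?_natCast, List.getElem?_eq_getElem hlt]

theorem pvDir_eq (rem : List Char) : pvADir rem = pvBDir rem := by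
  unfold pvADir pvBDir
  by_cases h8 : PySem.Chars.startswith rem ['$','i','n','c','l','u','d','e']
  · have hle : 8 ≤ rem.length := by
      have := (PySem.Chars.startswith_iff rem _).mp h8
      simpa using this.length_le
    simp [h8, List.findSome?]
    exact pvDir_bound rem 8 hle
  · by_cases h11 : PySem.Chars.startswith rem ['$','b','a','t','i','n','c','l','u','d','e']
    · have hle : 11 ≤ rem.length := by
        have := (PySem.Chars.startswith_iff rem _).mp h11
        simpa using this.length_le
      simp [h8, h11, List.findSome?]
      exact pvDir_bound rem 11 hle
    · simp [h8, h11, List.findSome?]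

theorem pvLoop_eq (cs : List Char) : ∀ n i inS inD, cs.length - i ≤ n → i ≤ cs.length →
    pvALoop cs (PySem.Chars.lower cs) inS inD i
      = pvBLoop (cs.drop i) inS inD (pvLastNW (cs.take i)) := by
  intro n
  induction n with
  | zero =>
    intro i inS inD h1 h2
    have hi : i = cs.length := by omega
    rw [pvALoop, pvBLoop.eq_def]
    simp [hi, List.drop_of_length_le]
  | succ n ih =>
    intro i inS inD h1 h2
    by_cases hlt : i < cs.length
    · have hdrop : cs.drop i = cs[i] :: cs.drop (i + 1) := List.drop_eq_getElem_cons hlt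
      have htake : cs.take (i + 1) = cs.take i ++ [cs[i]] := by
        rw [List.take_add_one]; simp [List.getElem?_eq_getElem hlt]
      have htail : (cs.drop (i + 1)).tail = cs.drop (i + 2) := by
        simp [List.tail_drop]
      have hhead : (cs.drop (i + 1)).head? = cs[i + 1]? := by
        simp [List.head?_drop]
      have hguard : ∀ q : Char,
          (decide (i + 1 < cs.length) && (cs[i + 1]? == some q)) = (cs[i + 1]? == some q) := by
        intro q
        by_cases hl : i + 1 < cs.length
        · simp [hl]
        · simp [hl]
      have ih1 : ∀ S D, pvALoop cs (PySem.Chars.lower cs) S D (i + 1)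
          = pvBLoop (cs.drop (i + 1)) S D
              (if PySem.Chars.isspace cs[i] = true then pvLastNW (cs.take i) else some cs[i]) := by
        intro S D
        rw [ih (i + 1) S D (by omega) (by omega), htake, pvLastNW_append_one]
      rw [pvALoop, hdrop, pvBLoop.eq_def]
      simp only [dif_pos hlt]
      have hguard2 : ∀ (S : Bool) (q : Char),
          (S && decide (i + 1 < cs.length) && (cs[i + 1]? == some q)) = (S && (cs[i + 1]? == some q)) := by
        intro S q
        by_cases hl : i + 1 < cs.length
        · simp [hl]
        · simp [hl]
      have hlow : (PySem.Chars.lower cs).drop i = PySem.Chars.lower (cs[i] :: cs.drop (i + 1)) := by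
        rw [← hdrop]; simp [PySem.Chars.lower, List.map_drop]
      simp only [hguard2, hhead, htail, hlow, pvDir_eq, pvBack_eq cs i (le_of_lt hlt)]
      by_cases hq1 : (cs[i] == '\'' && !inD) = true
      · rw [if_pos hq1, if_pos hq1]
        have hceq : cs[i] = '\'' := by
          have := (Bool.and_eq_true_iff.mp hq1).1; simpa using this
        by_cases hesc : (inS && (cs[i + 1]? == some '\'')) = true
        · rw [if_pos hesc, if_pos hesc]
          have hh := (Bool.and_eq_true_iff.mp hesc).2
          have hl2 : i + 1 < cs.length := by
            by_contra hcon
            simp [List.getElem?_eq_none (by omega : cs.length ≤ i + 1)] at hh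
          have hc2 : cs[i + 1] = '\'' := by
            rw [List.getElem?_eq_getElem hl2] at hh; simpa using hh
          have htake2 : pvLastNW (cs.take (i + 2)) = some '\'' := by
            have ht : cs.take (i + 2) = cs.take (i + 1) ++ [cs[i + 1]] := by
              rw [List.take_add_one]; simp [List.getElem?_eq_getElem hl2]
            rw [ht, pvLastNW_append_one, hc2]
            simp [show PySem.Chars.isspace '\'' = false from by decide]
          rw [ih (i + 2) inS inD (by omega) (by omega), htake2]
        · rw [if_neg hesc, if_neg hesc]
          rw [ih1 (!inS) inD]
      · rw [if_neg hq1, if_neg hq1]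
        by_cases hq2 : (cs[i] == '"' && !inS) = true
        · rw [if_pos hq2, if_pos hq2]
          have hceq : cs[i] = '"' := by
            have := (Bool.and_eq_true_iff.mp hq2).1; simpa using this
          by_cases hesc : (inD && (cs[i + 1]? == some '"')) = true
          · rw [if_pos hesc, if_pos hesc]
            have hh := (Bool.and_eq_true_iff.mp hesc).2
            have hl2 : i + 1 < cs.length := by
              by_contra hcon
              simp [List.getElem?_eq_none (by omega : cs.length ≤ i + 1)] at hh
            have hc2 : cs[i + 1] = '"' := by
              rw [List.getElem?_eq_getElem hl2] at hh; simpa using hh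
            have htake2 : pvLastNW (cs.take (i + 2)) = some '"' := by
              have ht : cs.take (i + 2) = cs.take (i + 1) ++ [cs[i + 1]] := by
                rw [List.take_add_one]; simp [List.getElem?_eq_getElem hl2]
              rw [ht, pvLastNW_append_one, hc2]
              simp [show PySem.Chars.isspace '"' = false from by decide]
            rw [ih (i + 2) inS inD (by omega) (by omega), htake2]
          · rw [if_neg hesc, if_neg hesc]
            rw [ih1 inS (!inD)]
        · rw [if_neg hq2, if_neg hq2]
          by_cases hq3 : (!inS && !inD) = true
          · rw [if_pos hq3, if_pos hq3]
            by_cases hst : (cs[i] == '*' && ((pvLastNW (cs.take i) == none) || (pvLastNW (cs.take i) == some ';'))) = true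
            · rw [if_pos hst, if_pos hst]
            · rw [if_neg hst, if_neg hst]
              by_cases hdl : (cs[i] == '$' && pvBDir (PySem.Chars.lower (cs[i] :: cs.drop (i + 1)))) = true
              · rw [if_pos hdl, if_pos hdl]
              · rw [if_neg hdl, if_neg hdl]
                exact ih1 inS inD
          · rw [if_neg hq3, if_neg hq3]
            exact ih1 inS inD
    · have hi : i = cs.length := by omega
      rw [pvALoop, pvBLoop.eq_def]
      simp [hi, List.drop_of_length_le]

theorem pvBLoop_comment (cs : List Char) :
    (PySem.Chars.lstrip cs).head? = some '*' → pvBLoop cs false false none = false := by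
  induction cs with
  | nil => intro h; simp [PySem.Chars.lstrip] at h
  | cons c rest ih =>
    intro h
    by_cases hs : PySem.Chars.isspace c = true
    · have hl : PySem.Chars.lstrip (c :: rest) = PySem.Chars.lstrip rest := by
        simp [PySem.Chars.lstrip, List.dropWhile, hs]
      rw [hl] at h
      have h1 : (c == '\'') = false := by
        by_contra hcon
        simp only [Bool.not_eq_false, beq_iff_eq] at hcon
        rw [hcon] at hs; exact absurd hs (by decide)
      have h2 : (c == '"') = false := by
        by_contra hcon
        simp only [Bool.not_eq_false, beq_iff_eq] at hcon
        rw [hcon] at hs; exact absurd hs (by decide)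
      have h3 : (c == '*') = false := by
        by_contra hcon
        simp only [Bool.not_eq_false, beq_iff_eq] at hcon
        rw [hcon] at hs; exact absurd hs (by decide)
      have h4 : (c == '$') = false := by
        by_contra hcon
        simp only [Bool.not_eq_false, beq_iff_eq] at hcon
        rw [hcon] at hs; exact absurd hs (by decide)
      rw [pvBLoop.eq_def]
      simp only [h1, h2, h3, h4, hs, Bool.false_and, Bool.not_false, Bool.and_true,
        Bool.false_eq_true, if_false, if_pos]
      exact ih h
    · have hl : PySem.Chars.lstrip (c :: rest) = c :: rest := by
        simp [PySem.Chars.lstrip, List.dropWhile, hs]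
      rw [hl] at h
      have hc : c = '*' := by simpa using h
      rw [pvBLoop.eq_def]
      simp [hc]

-- ===== VERDICT (by name: the statement is the Claim_ definition above) =====
theorem is_include_directive_py_spec : Claim_equal_is_include_directive_py := by
  intro line _
  unfold Spec_is_include_directive_py is_include_directive_py is_include_directive_py_alt
  by_cases h : PySem.Chars.startswith (PySem.Chars.lstrip line.toList) ['*'] = true
  · rw [if_pos h]
    have hpre := (PySem.Chars.startswith_iff _ _).mp h
    obtain ⟨t, ht⟩ := hpre
    have hh : (PySem.Chars.lstrip line.toList).head? = some '*' := by
      rw [← ht]; rfl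
    exact (pvBLoop_comment line.toList hh).symm
  · rw [if_neg h]
    have := pvLoop_eq line.toList line.toList.length 0 false false (by omega) (by omega)
    simpa [pvLastNW] using this
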